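-- pv_equiv track=rewrite | github.com/gaming-hacker/jburkardt_python | chrpak/chrpak.py | s_len_trim
-- ===== SOURCE A (Python) =====
-- def s_len_trim ( s ):
--
-- #*****************************************************************************80
-- #
-- ## s_len_trim() returns the length of a character string to the last nonblank.
-- #
-- #  Licensing:
-- #
-- #    This code is distributed under the GNU LGPL license.
-- #
-- #  Modified:
-- #
-- #   03 September 2018
-- #
-- #  Author:
-- #
-- #    John Burkardt
-- #
-- #  Input:
-- #
-- #    string S, a string.
-- #
-- #  Output:
-- #
-- #    integer VALUE, the length of the string to the last nonblank.
-- #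
--   n = len ( s )
--
--   for i in range ( n - 1, -1, -1 ):
--     if ( s[i] != ' ' ):
--       value = i + 1
--       return value
--
--   value = 0
--   return value
-- ===== SOURCE B (Python) =====
-- def s_len_trim(s):
--     value = 0
--     for i in range(len(s)):
--         if s[i] != ' ':
--             value = i + 1
--     return value
-- ===== Notes on version B (the rewrite author's own statement) =====
-- stated objective: alternative
-- what changed: Replaced A's back-to-front scan with an early return at the first nonblank by a single forward pass that keeps the index after the last nonblank seen and returns it once at the end.
import Mathlib
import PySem

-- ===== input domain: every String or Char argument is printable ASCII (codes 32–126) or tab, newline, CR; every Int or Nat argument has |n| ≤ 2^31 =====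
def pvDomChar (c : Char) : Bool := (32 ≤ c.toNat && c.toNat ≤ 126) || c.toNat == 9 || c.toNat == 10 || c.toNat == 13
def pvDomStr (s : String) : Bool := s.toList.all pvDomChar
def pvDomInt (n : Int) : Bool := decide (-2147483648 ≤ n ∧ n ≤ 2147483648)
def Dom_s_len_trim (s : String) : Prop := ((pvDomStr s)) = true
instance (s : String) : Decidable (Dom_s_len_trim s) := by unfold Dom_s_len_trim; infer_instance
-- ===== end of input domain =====

-- B scans forward keeping the index after the last nonblank; A scans backward and returns early.

-- ===== PORT A =====
-- the loop 'for i in range(n-1,-1,-1): if s[i] != ' ': return i+1', then 'return 0':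
-- recursion on the counter, i+1 ↦ test index i, fall through to i.
def sltGoA (cs : List Char) : Nat → Int
  | 0 => 0
  | i + 1 => if cs.getD i ' ' ≠ ' ' then ((i : Int) + 1) else sltGoA cs i

def s_len_trim (s : String) : Int := sltGoA s.toList s.toList.length

-- ===== PORT B =====
-- forward pass: value = 0; for i in range(len(s)): if s[i] != ' ': value = i+1
def s_len_trim_alt (s : String) : Int :=
  (s.toList.zipIdx).foldl (fun v ci => if ci.1 ≠ ' ' then ((ci.2 : Int) + 1) else v) 0

-- ===== PRECONDITION & SPEC =====
def Spec_s_len_trim (s : String) (out : Int) : Prop := out = s_len_trim_alt s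
instance (s : String) (out : Int) : Decidable (Spec_s_len_trim s out) := by unfold Spec_s_len_trim; infer_instance

-- ===== CLAIM (what is proved, stated in full; the proofs are below) =====
def Claim_equal_s_len_trim : Prop := ∀ (s : String), Dom_s_len_trim s → Spec_s_len_trim s (s_len_trim s)

-- ===== LEMMAS AND PROOFS =====

-- indices below cs.length ignore an appended character
theorem sltGoA_append (cs : List Char) (c : Char) :
    ∀ i, i ≤ cs.length → sltGoA (cs ++ [c]) i = sltGoA cs i := by
  intro i
  induction i with
  | zero => intro _; rfl
  | succ i ih =>
    intro h
    have hi : i < cs.length := by omega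
    simp only [sltGoA, List.getD_append _ _ _ _ hi, ih (by omega)]

theorem sltA_concat (cs : List Char) (c : Char) :
    sltGoA (cs ++ [c]) (cs ++ [c]).length
      = if c ≠ ' ' then ((cs.length : Int) + 1) else sltGoA cs cs.length := by
  simp only [List.length_append, List.length_cons, List.length_nil]
  show sltGoA (cs ++ [c]) (cs.length + 1) = _
  simp only [sltGoA]
  rw [List.getD_append_right _ _ _ _ (le_refl _)]
  simp [sltGoA_append cs c cs.length (le_refl _)]

theorem sltB_concat (cs : List Char) (c : Char) :
    (List.zipIdx (cs ++ [c])).foldl (fun v ci => if ci.1 ≠ ' ' then ((ci.2 : Int) + 1) else v) 0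
      = if c ≠ ' ' then ((cs.length : Int) + 1)
        else (List.zipIdx cs).foldl (fun v ci => if ci.1 ≠ ' ' then ((ci.2 : Int) + 1) else v) 0 := by
  rw [List.zipIdx_append, List.foldl_append]
  by_cases hc : c = ' ' <;> simp [hc]

theorem slt_eq (cs : List Char) :
    sltGoA cs cs.length
      = (List.zipIdx cs).foldl (fun v ci => if ci.1 ≠ ' ' then ((ci.2 : Int) + 1) else v) 0 := by
  induction cs using List.reverseRecOn with
  | nil => rfl
  | append_singleton cs c ih =>
    rw [sltA_concat, sltB_concat, ih]

-- ===== VERDICT (by name: the statement is the Claim_ definition above) =====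
theorem s_len_trim_spec : Claim_equal_s_len_trim := by
  intro s _
  unfold Spec_s_len_trim s_len_trim s_len_trim_alt
  exact slt_eq s.toList
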